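-- pv_equiv track=rewrite | github.com/mhee167/coding_test | 코딩테스트합격자되기/해시/할인행사.py | solution
-- ===== SOURCE A (Python) =====
-- def solution(want, number, discount):
--
--     # 딕셔너리 생성
--     want_dic = {x:num for x,num in zip(want,number)}
--
--     for i in range(len(discount)):
--         dic = want_dic.copy() #copy가 아니면 본 객체를 참조해서 같이 값이 변화됨
--         # 10 이상
--         if(i<=len(discount)-10):
--             for j in discount[i:i+10]:
--                 if j in dic:
--                     dic[j]-=1
--         # 10 이하
--         else:
--             for j in discount[i:]:
--                 if j in dic:
--                     dic[j]-=1
--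
--         #다 0이라면 return
--         for v in dic.values():
--             if v>0:
--                 break
--         else:
--             return i+1
--
--     return 0
-- ===== SOURCE B (Python) =====
-- def solution(want, number, discount):
--     req = {x: n for x, n in zip(want, number)}
--     n = len(discount)
--     # counts of wanted items in the current window discount[i:i+10]
--     cnt = dict.fromkeys(req, 0)
--     for j in discount[:10]:
--         if j in req:
--             cnt[j] += 1
--     # number of wanted item-types currently short of their requirement
--     unsat = sum(1 for k in req if cnt[k] < req[k])
--     for i in range(n):
--         if unsat == 0:
--             return i + 1
--         j = discount[i]
--         if j in req:
--             if cnt[j] == req[j]: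
--                 unsat += 1
--             cnt[j] -= 1
--         if i + 10 < n:
--             nj = discount[i + 10]
--             if nj in req:
--                 cnt[nj] += 1
--                 if cnt[nj] == req[nj]:
--                     unsat -= 1
--     return 0
-- ===== Notes on version B (the rewrite author's own statement) =====
-- stated objective: faster
-- what changed: Instead of copying the wanted-items dict, re-scanning a fresh 10-element window and re-checking every value for each start index, B keeps one sliding counter of the current window plus an integer count of unsatisfied item-types, updating both in O(1) per step (only the leaving and entering elements).
import Mathlib
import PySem

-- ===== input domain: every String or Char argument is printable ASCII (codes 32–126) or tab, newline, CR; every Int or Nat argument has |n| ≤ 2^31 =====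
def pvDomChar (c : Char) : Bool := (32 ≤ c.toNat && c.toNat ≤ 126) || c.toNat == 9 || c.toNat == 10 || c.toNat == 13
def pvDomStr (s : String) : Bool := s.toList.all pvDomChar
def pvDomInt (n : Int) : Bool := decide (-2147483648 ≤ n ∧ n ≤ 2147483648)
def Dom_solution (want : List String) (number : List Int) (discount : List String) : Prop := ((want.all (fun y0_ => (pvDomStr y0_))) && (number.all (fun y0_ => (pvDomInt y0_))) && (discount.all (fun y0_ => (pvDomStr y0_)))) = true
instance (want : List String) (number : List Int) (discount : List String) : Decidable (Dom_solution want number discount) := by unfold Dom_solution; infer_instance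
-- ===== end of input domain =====

-- B replaces A's per-window dict copy and 10-element re-scan by one sliding counter of the current window (alternative/faster decomposition); return values proved equal.

-- ===== PORT A =====
-- want_dic = {x:num for x,num in zip(want,number)}
def aDict (want : List String) (number : List Int) : PySem.Dict String Int :=
  (want.zip number).foldl (fun d p => d.insert p.1 p.2) PySem.Dict.empty

-- inner loop: for j in win: if j in dic: dic[j] -= 1
def aScan (dic : PySem.Dict String Int) (win : List String) : PySem.Dict String Int :=
  win.foldl (fun d j => if d.contains j then d.modify j 0 (fun v => v - 1) else d) dic

-- for i in range(len(discount)): … early return i+1, else fall through to 0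
def aLoop (wd : PySem.Dict String Int) (discount : List String) : List Int → Int
  | [] => 0
  | i :: rest =>
    let dic :=
      if i ≤ (discount.length : Int) - 10 then
        aScan wd (PySem.List.slice discount (some i) (some (i + 10)))
      else
        aScan wd (PySem.List.slice discount (some i) none)
    -- for v in dic.values(): if v>0: break / else: return i+1
    if dic.values.all (fun v => decide (v ≤ 0)) then i + 1 else aLoop wd discount rest

def solution (want : List String) (number : List Int) (discount : List String) : Int :=
  aLoop (aDict want number) discount (PySem.List.pyRange 0 discount.length 1)

-- ===== PORT B =====
-- req = {x: n for x, n in zip(want, number)}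
def bDict (want : List String) (number : List Int) : PySem.Dict String Int :=
  (want.zip number).foldl (fun d p => d.insert p.1 p.2) PySem.Dict.empty

-- cnt = dict.fromkeys(req, 0)
def bFromKeys (req : PySem.Dict String Int) : PySem.Dict String Int :=
  req.keys.foldl (fun c k => c.insert k 0) PySem.Dict.empty

-- for j in discount[:10]: if j in req: cnt[j] += 1
def bInit (req : PySem.Dict String Int) (discount : List String) : PySem.Dict String Int :=
  (PySem.List.slice discount none (some 10)).foldl
    (fun c j => if req.contains j then c.modify j 0 (fun v => v + 1) else c) (bFromKeys req)

-- unsat = sum(1 for k in req if cnt[k] < req[k])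
def bUnsat (req cnt : PySem.Dict String Int) : Int :=
  ((req.keys.countP (fun k => decide (cnt.getD k 0 < req.getD k 0)) : Nat) : Int)

-- for i in range(n): check unsat == 0, then slide the window counter and unsat by one step
def bLoop (req : PySem.Dict String Int) (discount : List String) :
    List Int → PySem.Dict String Int → Int → Int
  | [], _, _ => 0
  | i :: rest, cnt, unsat =>
    if unsat == 0 then i + 1
    else
      match PySem.List.pyGet? discount i with
      | none => 0  -- unreachable: i is drawn from range(len(discount))
      | some j =>
        -- if j in req: (if cnt[j] == req[j]: unsat += 1); cnt[j] -= 1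
        let unsat1 := if req.contains j then
            (if cnt.getD j 0 == req.getD j 0 then unsat + 1 else unsat) else unsat
        let cnt1 := if req.contains j then cnt.modify j 0 (fun v => v - 1) else cnt
        -- if i+10 < n: nj = discount[i+10]; if nj in req: cnt[nj] += 1; if cnt[nj] == req[nj]: unsat -= 1
        if i + 10 < (discount.length : Int) then
          match PySem.List.pyGet? discount (i + 10) with
          | none => bLoop req discount rest cnt1 unsat1  -- unreachable: i+10 < len(discount)
          | some nj =>
            if req.contains nj then
              let cnt2 := cnt1.modify nj 0 (fun v => v + 1)
              let unsat2 := if cnt2.getD nj 0 == req.getD nj 0 then unsat1 - 1 else unsat1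
              bLoop req discount rest cnt2 unsat2
            else bLoop req discount rest cnt1 unsat1
        else bLoop req discount rest cnt1 unsat1

def solution_alt (want : List String) (number : List Int) (discount : List String) : Int :=
  let req := bDict want number
  let cnt := bInit req discount
  bLoop req discount (PySem.List.pyRange 0 discount.length 1) cnt (bUnsat req cnt)

-- ===== PRECONDITION & SPEC =====
def Spec_solution (want : List String) (number : List Int) (discount : List String) (out : Int) : Prop := out = solution_alt want number discount
instance (want : List String) (number : List Int) (discount : List String) (out : Int) : Decidable (Spec_solution want number discount out) := by unfold Spec_solution; infer_instance

-- ===== CLAIM (what is proved, stated in full; the proofs are below) =====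
def Claim_equal_solution : Prop := ∀ (want : List String) (number : List Int) (discount : List String), Dom_solution want number discount → Spec_solution want number discount (solution want number discount)

-- ===== LEMMAS AND PROOFS =====

-- the wanted dict has unique keys
theorem aDict_keys_nodup (want : List String) (number : List Int) :
    (aDict want number).keys.Nodup := by
  unfold aDict
  exact PySem.Dict.nodup_keys_foldl_insert_key _ Prod.fst _ _ PySem.Dict.nodup_keys_empty

-- aScan keeps the key list
theorem aScan_keys (dic : PySem.Dict String Int) (win : List String) :
    (aScan dic win).keys = dic.keys := by
  induction win generalizing dic with
  | nil => rfl
  | cons j rest ih =>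
    show (aScan (if dic.contains j = true then dic.modify j 0 (fun v => v - 1) else dic) rest).keys = dic.keys
    by_cases hc : dic.contains j = true
    · rw [if_pos hc, ih, PySem.Dict.keys_modify, PySem.Dict.keys_insert_of_contains _ _ hc]
    · rw [if_neg hc, ih]

-- aScan decrements each contained key by its window count
theorem aScan_getD (dic : PySem.Dict String Int) (win : List String) (k : String)
    (hk : dic.contains k = true) :
    (aScan dic win).getD k 0 = dic.getD k 0 - win.count k := by
  induction win generalizing dic with
  | nil => simp [aScan]
  | cons j rest ih =>
    show (aScan (if dic.contains j = true then dic.modify j 0 (fun v => v - 1) else dic) rest).getD k 0 = _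
    by_cases hj : j = k
    · subst hj
      rw [if_pos hk, ih _ (by rw [PySem.Dict.contains_modify]; simp)]
      rw [PySem.Dict.getD_modify_self]
      simp only [List.count_cons_self]
      push_cast
      ring
    · by_cases hc : dic.contains j = true
      · rw [if_pos hc, ih _ (by rw [PySem.Dict.contains_modify]; simp [hk])]
        rw [PySem.Dict.getD_modify_of_ne dic 0 (fun v => v - 1) (Ne.symm hj)]
        rw [List.count_cons_of_ne hj]
      · rw [if_neg hc, ih _ hk, List.count_cons_of_ne hj]

-- dict.fromkeys(req, 0): every default lookup is 0
theorem bFromKeys_fold_getD (l : List String) (c : PySem.Dict String Int) (k : String)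
    (hc : c.getD k 0 = 0) :
    (l.foldl (fun c k => c.insert k 0) c).getD k 0 = 0 := by
  induction l generalizing c with
  | nil => exact hc
  | cons a t ih =>
    simp only [List.foldl_cons]
    apply ih
    rw [PySem.Dict.getD_insert]
    split_ifs with h
    · rfl
    · exact hc

-- the counting fold used by bInit
theorem bInit_fold_getD (req : PySem.Dict String Int) (l : List String)
    (c : PySem.Dict String Int) (k : String) (hk : req.contains k = true) :
    (l.foldl (fun c j => if req.contains j then c.modify j 0 (fun v => v + 1) else c) c).getD k 0
      = c.getD k 0 + l.count k := by
  induction l generalizing c with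
  | nil => simp
  | cons j rest ih =>
    simp only [List.foldl_cons]
    by_cases hj : j = k
    · subst hj
      rw [if_pos hk, ih _, PySem.Dict.getD_modify_self, List.count_cons_self]
      push_cast
      ring
    · have hstep : (if req.contains j = true then c.modify j 0 (fun v => v + 1) else c).getD k 0
          = c.getD k 0 := by
        by_cases hc : req.contains j = true
        · rw [if_pos hc]
          exact PySem.Dict.getD_modify_of_ne c 0 (fun v => v + 1) (Ne.symm hj)
        · rw [if_neg hc]
      rw [ih _, hstep, List.count_cons_of_ne hj]

-- countP over a Nodup list after changing the predicate at one key only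
theorem countP_update (l : List String) (hl : l.Nodup) (p q : String → Bool) (j : String)
    (hsame : ∀ k ∈ l, k ≠ j → p k = q k) :
    ((l.countP q : Nat) : Int) = (l.countP p : Nat)
      + (if j ∈ l then (if q j then (1:Int) else 0) - (if p j then (1:Int) else 0) else 0) := by
  induction l with
  | nil => simp
  | cons a t ih =>
    rw [List.nodup_cons] at hl
    rw [List.countP_cons, List.countP_cons]
    by_cases haj : a = j
    · subst haj
      have ht : t.countP p = t.countP q :=
        List.countP_congr (fun k hk => by
          rw [hsame k (List.mem_cons_of_mem a hk) (fun h => hl.1 (h ▸ hk))])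
      rw [← ht, if_pos (List.mem_cons_self)]
      split_ifs <;> push_cast <;> omega
    · have ht := ih hl.2 (fun k hk hkj => hsame k (List.mem_cons_of_mem a hk) hkj)
      have ha : p a = q a := hsame a List.mem_cons_self haj
      rw [← ha]
      have hmem : j ∈ a :: t ↔ j ∈ t := by
        simp [List.mem_cons, Ne.symm haj]
      by_cases hjt : j ∈ t
      · rw [if_pos (hmem.mpr hjt)]
        rw [if_pos hjt] at ht
        split_ifs at ht ⊢ <;> push_cast at ht ⊢ <;> omega
      · rw [if_neg (fun h => hjt (hmem.mp h))]
        rw [if_neg hjt] at ht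
        split_ifs at ht ⊢ <;> push_cast at ht ⊢ <;> omega

-- unsat update when the leaving element j is removed from the window counter
theorem unsat_dec (req cnt : PySem.Dict String Int) (j : String) (hnd : req.keys.Nodup) :
    bUnsat req (if req.contains j = true then cnt.modify j 0 (fun v => v - 1) else cnt)
      = if req.contains j = true then
          (if cnt.getD j 0 == req.getD j 0 then bUnsat req cnt + 1 else bUnsat req cnt)
        else bUnsat req cnt := by
  by_cases hcj : req.contains j = true
  · rw [if_pos hcj, if_pos hcj]
    unfold bUnsat
    rw [countP_update req.keys hnd
      (fun k => decide (cnt.getD k 0 < req.getD k 0))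
      (fun k => decide ((cnt.modify j 0 (fun v => v - 1)).getD k 0 < req.getD k 0)) j
      (fun k _ hkj => by
        dsimp only
        rw [PySem.Dict.getD_modify_of_ne cnt 0 _ hkj])]
    rw [if_pos ((PySem.Dict.contains_iff_mem_keys req j).mp hcj),
      PySem.Dict.getD_modify_self]
    split_ifs <;> simp_all only [decide_eq_true_eq, beq_iff_eq, not_lt] <;> omega
  · rw [if_neg hcj, if_neg hcj]

-- unsat update when the entering element nj is added to the window counter
theorem unsat_inc (req cnt : PySem.Dict String Int) (nj : String) (hnd : req.keys.Nodup)
    (hcj : req.contains nj = true) :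
    bUnsat req (cnt.modify nj 0 (fun v => v + 1))
      = if (cnt.modify nj 0 (fun v => v + 1)).getD nj 0 == req.getD nj 0 then
          bUnsat req cnt - 1 else bUnsat req cnt := by
  unfold bUnsat
  rw [countP_update req.keys hnd
    (fun k => decide (cnt.getD k 0 < req.getD k 0))
    (fun k => decide ((cnt.modify nj 0 (fun v => v + 1)).getD k 0 < req.getD k 0)) nj
    (fun k _ hkj => by
      dsimp only
      rw [PySem.Dict.getD_modify_of_ne cnt 0 _ hkj])]
  rw [if_pos ((PySem.Dict.contains_iff_mem_keys req nj).mp hcj),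
    PySem.Dict.getD_modify_self]
  split_ifs <;> simp_all only [decide_eq_true_eq, beq_iff_eq, not_lt] <;> omega

-- window invariant: cnt holds the wanted-item counts of discount[i:i+10]
def WInv (req : PySem.Dict String Int) (discount : List String) (i : Nat)
    (cnt : PySem.Dict String Int) : Prop :=
  ∀ k, req.contains k = true → cnt.getD k 0 = (((discount.drop i).take 10).count k : Int)

-- A's all-values-nonpositive check is B's unsat == 0
theorem check_eq (wd : PySem.Dict String Int) (discount : List String) (i : Nat)
    (cnt : PySem.Dict String Int) (hnd : wd.keys.Nodup) (hinv : WInv wd discount i cnt)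
    (W : List String) (hW : W = (discount.drop i).take 10) :
    ((aScan wd W).values.all (fun v => decide (v ≤ 0))) = (bUnsat wd cnt == 0) := by
  subst hW
  have hks : (aScan wd ((discount.drop i).take 10)).keys = wd.keys := aScan_keys _ _
  rw [PySem.Dict.values_eq_map_keys _ (by rw [hks]; exact hnd) 0, hks, List.all_map]
  apply Bool.coe_iff_coe.mp
  unfold bUnsat
  rw [beq_iff_eq]
  have hz : (((wd.keys.countP (fun k => decide (cnt.getD k 0 < wd.getD k 0)) : Nat) : Int) = 0)
      ↔ wd.keys.countP (fun k => decide (cnt.getD k 0 < wd.getD k 0)) = 0 := by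
    omega
  rw [hz, List.countP_eq_zero]
  simp only [List.all_eq_true, Function.comp]
  constructor
  all_goals
    intro h k hkmem
    have := h k hkmem
    have hck := (PySem.Dict.contains_iff_mem_keys wd k).mpr hkmem
    simp only [decide_eq_true_eq] at this ⊢
    try rw [aScan_getD _ _ _ hck] at this
    try rw [aScan_getD _ _ _ hck]
    try rw [hinv k hck] at this
    try rw [hinv k hck]
    omega

-- the main loop correspondence
theorem loop_eq (wd : PySem.Dict String Int) (discount : List String)
    (hnd : wd.keys.Nodup) :
    ∀ (m i : Nat), i + m = discount.length →
      ∀ cnt, WInv wd discount i cnt →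
        aLoop wd discount (PySem.List.pyRange i discount.length 1)
          = bLoop wd discount (PySem.List.pyRange i discount.length 1) cnt (bUnsat wd cnt) := by
  intro m
  induction m with
  | zero =>
    intro i hi cnt _
    rw [PySem.List.pyRange_one_eq_nil (by omega : (discount.length : Int) ≤ (i : Int))]
    rfl
  | succ m ih =>
    intro i hi cnt hinv
    have hilt : i < discount.length := by omega
    rw [PySem.List.pyRange_one_cons (by exact_mod_cast hilt)]
    simp only [aLoop, bLoop]
    have hwin : (if (i : Int) ≤ (discount.length : Int) - 10 then
        aScan wd (PySem.List.slice discount (some (i : Int)) (some ((i : Int) + 10))) else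
        aScan wd (PySem.List.slice discount (some (i : Int)) none)) = aScan wd ((discount.drop i).take 10) := by
      by_cases hc : (i : Int) ≤ (discount.length : Int) - 10
      · rw [if_pos hc, show ((i : Int) + 10) = ((i : Int) + ((10 : Nat) : Int)) by norm_num,
          PySem.List.slice_natCast_add]
      · rw [if_neg hc, PySem.List.slice_from_natCast,
          List.take_of_length_le (by simp only [List.length_drop]; omega)]
    rw [hwin, check_eq wd discount i cnt hnd hinv _ rfl]
    by_cases hchk : (bUnsat wd cnt == 0) = true
    · rw [if_pos hchk, if_pos hchk]
    · rw [if_neg hchk, if_neg hchk]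
      have hj : PySem.List.pyGet? discount (i : Int) = some discount[i] := by
        rw [PySem.List.pyGet?_natCast, List.getElem?_eq_getElem hilt]
      rw [hj]
      dsimp only
      have hcast : ((i : Int) + 1) = ((i + 1 : Nat) : Int) := by push_cast; ring
      rw [hcast]
      have hW1 : (discount.drop i).take 10 = discount[i] :: ((discount.drop (i + 1)).take 9) := by
        rw [List.drop_eq_getElem_cons hilt, show (10 : Nat) = 9 + 1 from rfl, List.take_succ_cons]
      -- cnt after removing the leaving element
      have hcnt1 : ∀ k, wd.contains k = true →
          (if wd.contains discount[i] = true then cnt.modify discount[i] 0 (fun v => v - 1) else cnt).getD k 0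
            = (((discount.drop (i + 1)).take 9).count k : Int) := by
        intro k hk
        have hWc := hinv k hk
        rw [hW1] at hWc
        by_cases hjk : discount[i] = k
        · subst hjk
          rw [if_pos hk, PySem.Dict.getD_modify_self]
          rw [List.count_cons_self] at hWc
          omega
        · rw [List.count_cons_of_ne hjk] at hWc
          by_cases hcj : wd.contains discount[i] = true
          · rw [if_pos hcj, PySem.Dict.getD_modify_of_ne cnt 0 (fun v => v - 1) (Ne.symm hjk)]
            exact hWc
          · rw [if_neg hcj]
            exact hWc
      rw [← unsat_dec wd cnt discount[i] hnd]
      by_cases hlt : i + 10 < discount.length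
      · rw [if_pos (by exact_mod_cast hlt : (i : Int) + 10 < (discount.length : Int))]
        have hnj : PySem.List.pyGet? discount ((i : Int) + 10) = some discount[i + 10] := by
          rw [show ((i : Int) + 10) = ((i + 10 : Nat) : Int) by push_cast; ring,
            PySem.List.pyGet?_natCast, List.getElem?_eq_getElem hlt]
        rw [hnj]
        dsimp only
        have hW2 : (discount.drop (i + 1)).take 10 = ((discount.drop (i + 1)).take 9) ++ [discount[i + 10]] := by
          have h1 : (discount.drop (i + 1)).take (9 + 1)
              = (discount.drop (i + 1)).take 9 ++ ((discount.drop (i + 1))[9]?).toList := List.take_add_one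
          rw [List.getElem?_drop, show i + 1 + 9 = i + 10 from by omega,
            List.getElem?_eq_getElem hlt] at h1
          simpa using h1
        by_cases hcj : wd.contains discount[i + 10] = true
        · rw [if_pos hcj, ← unsat_inc wd _ discount[i + 10] hnd hcj]
          apply ih (i + 1) (by omega)
          intro k hk
          rw [hW2]
          by_cases hnjk : discount[i + 10] = k
          · subst hnjk
            rw [PySem.Dict.getD_modify_self, hcnt1 _ hk, List.count_append]
            simp
          · rw [PySem.Dict.getD_modify_of_ne _ 0 _ (Ne.symm hnjk), hcnt1 _ hk,
              List.count_append]
            simp [hnjk]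
        · rw [if_neg hcj]
          apply ih (i + 1) (by omega)
          intro k hk
          rw [hW2, List.count_append]
          have hne : discount[i + 10] ≠ k := fun h => hcj (h ▸ hk)
          rw [show List.count k [discount[i + 10]] = 0 by simp [hne], hcnt1 k hk]
          push_cast
          ring
      · rw [if_neg (by omega : ¬ ((i : Int) + 10 < (discount.length : Int)))]
        apply ih (i + 1) (by omega)
        intro k hk
        rw [List.take_of_length_le (by simp only [List.length_drop]; omega),
          ← List.take_of_length_le (by simp only [List.length_drop]; omega :
              (discount.drop (i + 1)).length ≤ 9)]
        exact hcnt1 k hk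

-- ===== VERDICT (by name: the statement is the Claim_ definition above) =====
theorem solution_spec : Claim_equal_solution := by
  intro want number discount _
  unfold Spec_solution solution solution_alt
  have hreq : bDict want number = aDict want number := rfl
  rw [hreq]
  apply loop_eq (aDict want number) discount (aDict_keys_nodup want number)
    discount.length 0 (by omega)
  intro k hk
  unfold bInit
  have h10 : PySem.List.slice discount none (some 10) = discount.take 10 := by
    rw [PySem.List.slice_to discount (by norm_num : (0:Int) ≤ 10)]
    simp
  rw [h10, bInit_fold_getD _ _ _ _ hk]
  unfold bFromKeys
  rw [bFromKeys_fold_getD _ _ _ (PySem.Dict.getD_empty _ _)]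
  simp
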